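-- pv_equiv track=rewrite | github.com/cagatay-softgineer/Efficiency-Analyzer | Sunburst.py | find_most_consecutive_areas
-- ===== SOURCE A (Python) =====
-- def find_most_consecutive_areas(arr):
--
--     n = len(arr)
--     true_areas = []
--     false_areas = []
--
--     i = 0
--     while i < n:
--         # Find consecutive True areas
--         while i < n and arr[i]:
--             start_true = i
--             while i < n and arr[i]:
--                 i += 1
--             end_true = i - 1
--             true_areas.append((start_true, end_true))
--
--         # Find consecutive False areas
--         while i < n and not arr[i]:
--             start_false = i
--             while i < n and not arr[i]:
--                 i += 1
--             end_false = i - 1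
--             false_areas.append((start_false, end_false))
--
--     return true_areas, false_areas
-- ===== SOURCE B (Python) =====
-- def find_most_consecutive_areas(arr):
--     n = len(arr)
--     bounds = [i for i in range(n + 1)
--               if i == 0 or i == n or bool(arr[i]) != bool(arr[i - 1])]
--     runs = list(zip(bounds, bounds[1:]))
--     true_areas = [(s, e - 1) for s, e in runs if arr[s]]
--     false_areas = [(s, e - 1) for s, e in runs if not arr[s]]
--     return true_areas, false_areas
-- ===== Notes on version B (the rewrite author's own statement) =====
-- stated objective: alternative
-- what changed: Replaces the nested index-advancing while loops with staged passes: a boundary-index comprehension (positions where adjacent truthiness differs), zip-pairing consecutive boundaries into runs, then two filtered comprehensions splitting runs by their starting value.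
import Mathlib
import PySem

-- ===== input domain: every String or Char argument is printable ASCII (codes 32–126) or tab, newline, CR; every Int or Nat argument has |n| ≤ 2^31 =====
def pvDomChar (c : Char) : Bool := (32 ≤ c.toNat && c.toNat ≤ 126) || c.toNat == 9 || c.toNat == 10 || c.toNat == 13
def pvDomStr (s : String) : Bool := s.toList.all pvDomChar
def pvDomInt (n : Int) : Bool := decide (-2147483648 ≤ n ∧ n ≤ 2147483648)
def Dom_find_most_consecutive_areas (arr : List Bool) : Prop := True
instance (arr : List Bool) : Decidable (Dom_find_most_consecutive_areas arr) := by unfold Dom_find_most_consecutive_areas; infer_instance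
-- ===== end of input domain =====

-- B replaces A's nested index-advancing while loops by staged passes: a boundary-index
-- comprehension (positions where adjacent truthiness differs), zip-pairing of consecutive
-- boundaries into runs, then two filtered comprehensions (objective: alternative).
-- Return values only, no argument is mutated. A's loops are ported with a structural fuel
-- parameter that only guards totality (the supplied fuel is always sufficient, as proved below).

-- ===== PORT A =====
-- innermost 'while i < n and arr[i]: i += 1' (fuel-guarded; arr.length fuel always suffices)
def pvSkipT (arr : List Bool) : Nat → Nat → Nat
  | 0, i => i
  | f + 1, i =>
      if i < arr.length ∧ arr.getD i false = true then pvSkipT arr f (i + 1) else i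

-- innermost 'while i < n and not arr[i]: i += 1'
def pvSkipF (arr : List Bool) : Nat → Nat → Nat
  | 0, i => i
  | f + 1, i =>
      if i < arr.length ∧ arr.getD i false = false then pvSkipF arr f (i + 1) else i

-- middle 'while i < n and arr[i]:' loop (body: inner skip, then append (start, i-1))
def pvTrueLoop (arr : List Bool) : Nat → Nat → List (Int × Int) → Nat × List (Int × Int)
  | 0, i, acc => (i, acc)
  | f + 1, i, acc =>
      if i < arr.length ∧ arr.getD i false = true then
        pvTrueLoop arr f (pvSkipT arr arr.length i)
          (acc ++ [((i : Int), (pvSkipT arr arr.length i : Int) - 1)])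
      else (i, acc)

-- middle 'while i < n and not arr[i]:' loop
def pvFalseLoop (arr : List Bool) : Nat → Nat → List (Int × Int) → Nat × List (Int × Int)
  | 0, i, acc => (i, acc)
  | f + 1, i, acc =>
      if i < arr.length ∧ arr.getD i false = false then
        pvFalseLoop arr f (pvSkipF arr arr.length i)
          (acc ++ [((i : Int), (pvSkipF arr arr.length i : Int) - 1)])
      else (i, acc)

-- outer 'while i < n:' loop of A
def pvOuter (arr : List Bool) : Nat → Nat → List (Int × Int) → List (Int × Int) →
    List (Int × Int) × List (Int × Int)
  | 0, _, ta, fa => (ta, fa)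
  | f + 1, i, ta, fa =>
      if i < arr.length then
        let r1 := pvTrueLoop arr arr.length i ta
        let r2 := pvFalseLoop arr arr.length r1.1 fa
        pvOuter arr f r2.1 r1.2 r2.2
      else (ta, fa)

def find_most_consecutive_areas (arr : List Bool) :
    (List (Int × Int)) × (List (Int × Int)) :=
  pvOuter arr (arr.length + 1) 0 [] []

-- ===== PORT B =====
-- '[i for i in range(n + 1) if i == 0 or i == n or bool(arr[i]) != bool(arr[i - 1])]'
-- (the 'i == 0 or i == n' guards fire before any indexing, so getD's default is never the value)
def pvBounds (arr : List Bool) : List Nat :=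
  (List.range (arr.length + 1)).filter
    (fun i => i == 0 || i == arr.length || arr.getD i false != arr.getD (i - 1) false)

-- 'runs = list(zip(bounds, bounds[1:]))', then the two filtered comprehensions
def find_most_consecutive_areas_alt (arr : List Bool) :
    (List (Int × Int)) × (List (Int × Int)) :=
  let bounds := pvBounds arr
  let runs := bounds.zip bounds.tail
  ((runs.filter (fun p => arr.getD p.1 false)).map (fun p => ((p.1 : Int), (p.2 : Int) - 1)),
   (runs.filter (fun p => !arr.getD p.1 false)).map (fun p => ((p.1 : Int), (p.2 : Int) - 1)))

-- ===== PRECONDITION & SPEC =====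
def Spec_find_most_consecutive_areas (arr : List Bool) (out : (List (Int × Int)) × (List (Int × Int))) : Prop := out = find_most_consecutive_areas_alt arr
instance (arr : List Bool) (out : (List (Int × Int)) × (List (Int × Int))) : Decidable (Spec_find_most_consecutive_areas arr out) := by unfold Spec_find_most_consecutive_areas; infer_instance

-- ===== CLAIM (what is proved, stated in full; the proofs are below) =====
def Claim_equal_find_most_consecutive_areas : Prop := ∀ (arr : List Bool), Dom_find_most_consecutive_areas arr → Spec_find_most_consecutive_areas arr (find_most_consecutive_areas arr)

-- ===== LEMMAS AND PROOFS =====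

-- proof-side reference: the maximal runs of arr as (key, length) pairs, and the
-- intervals/areas they induce; both ports are proved equal to pvEmit (pvRuns arr) 0
def pvRunsF : Nat → List Bool → List (Bool × Nat)
  | 0, _ => []
  | _, [] => []
  | f + 1, x :: xs =>
      (x, 1 + (xs.takeWhile (· == x)).length) :: pvRunsF f (xs.dropWhile (· == x))

def pvRuns (l : List Bool) : List (Bool × Nat) := pvRunsF l.length l

def pvEmit (runs : List (Bool × Nat)) (off : Int) :
    List (Int × Int) × List (Int × Int) :=
  match runs with
  | [] => ([], [])
  | (k, c) :: rest =>
      let r := pvEmit rest (off + c)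
      if k then ((off, off + (c : Int) - 1) :: r.1, r.2)
      else (r.1, (off, off + (c : Int) - 1) :: r.2)

def pvIv : List (Bool × Nat) → Nat → List (Nat × Nat)
  | [], _ => []
  | (_, c) :: rest, off => (off, off + c) :: pvIv rest (off + c)

theorem pvGetD_lt {l : List Bool} {i : Nat} (h : i < l.length) :
    l.getD i false = l[i] := by
  simp [List.getD_eq_getElem?_getD, List.getElem?_eq_getElem h]

theorem pvNotT {arr : List Bool} {i : Nat} (hb : arr.getD i false = false) :
    ¬ (i < arr.length ∧ arr.getD i false = true) :=
  fun hx => by rw [hb] at hx; exact Bool.false_ne_true hx.2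

theorem pvDropWhile_eq_drop (p : Bool → Bool) (l : List Bool) :
    l.dropWhile p = l.drop (l.takeWhile p).length := by
  induction l with
  | nil => simp
  | cons x xs ih =>
      by_cases h : p x = true
      · simp [List.dropWhile_cons, List.takeWhile_cons, h, ih]
      · simp [List.dropWhile_cons, List.takeWhile_cons, h]

-- pvSkipT with sufficient fuel = index of the end of the true run starting at i
theorem pvSkipT_eq (arr : List Bool) :
    ∀ (f i : Nat), arr.length - i ≤ f →
      pvSkipT arr f i = i + ((arr.drop i).takeWhile (· == true)).length := by
  intro f
  induction f with
  | zero =>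
      intro i hf
      rw [pvSkipT, List.drop_of_length_le (by omega)]
      simp
  | succ f ih =>
      intro i hf
      by_cases hc : i < arr.length ∧ arr.getD i false = true
      · obtain ⟨hl, hb⟩ := hc
        rw [pvSkipT, if_pos ⟨hl, hb⟩, List.drop_eq_getElem_cons hl]
        rw [pvGetD_lt hl] at hb
        rw [ih (i + 1) (by omega)]
        simp [List.takeWhile_cons, hb]
        omega
      · rw [pvSkipT, if_neg hc]
        by_cases hl : i < arr.length
        · have hb : arr.getD i false = false := by
            rcases Bool.eq_false_or_eq_true (arr.getD i false) with hb | hb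
            · exact absurd ⟨hl, hb⟩ hc
            · exact hb
          rw [List.drop_eq_getElem_cons hl]
          rw [pvGetD_lt hl] at hb
          simp [List.takeWhile_cons, hb]
        · rw [List.drop_of_length_le (by omega)]; simp

theorem pvSkipF_eq (arr : List Bool) :
    ∀ (f i : Nat), arr.length - i ≤ f →
      pvSkipF arr f i = i + ((arr.drop i).takeWhile (· == false)).length := by
  intro f
  induction f with
  | zero =>
      intro i hf
      rw [pvSkipF, List.drop_of_length_le (by omega)]
      simp
  | succ f ih =>
      intro i hf
      by_cases hc : i < arr.length ∧ arr.getD i false = false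
      · obtain ⟨hl, hb⟩ := hc
        rw [pvSkipF, if_pos ⟨hl, hb⟩, List.drop_eq_getElem_cons hl]
        rw [pvGetD_lt hl] at hb
        rw [ih (i + 1) (by omega)]
        simp [List.takeWhile_cons, hb]
        omega
      · rw [pvSkipF, if_neg hc]
        by_cases hl : i < arr.length
        · have hb : arr.getD i false = true := by
            rcases Bool.eq_false_or_eq_true (arr.getD i false) with hb | hb
            · exact hb
            · exact absurd ⟨hl, hb⟩ hc
          rw [List.drop_eq_getElem_cons hl]
          rw [pvGetD_lt hl] at hb
          simp [List.takeWhile_cons, hb]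
        · rw [List.drop_of_length_le (by omega)]; simp

-- where pvSkipT (with sufficient fuel) stops, the loop condition is false
theorem pvSkipT_stop (arr : List Bool) :
    ∀ (f i : Nat), arr.length - i ≤ f →
      ¬ (pvSkipT arr f i < arr.length ∧ arr.getD (pvSkipT arr f i) false = true) := by
  intro f
  induction f with
  | zero => intro i hf; rw [pvSkipT]; omega
  | succ f ih =>
      intro i hf
      by_cases hc : i < arr.length ∧ arr.getD i false = true
      · rw [pvSkipT, if_pos hc]; exact ih (i + 1) (by omega)
      · rw [pvSkipT, if_neg hc]; exact hc

theorem pvSkipF_stop (arr : List Bool) :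
    ∀ (f i : Nat), arr.length - i ≤ f →
      ¬ (pvSkipF arr f i < arr.length ∧ arr.getD (pvSkipF arr f i) false = false) := by
  intro f
  induction f with
  | zero => intro i hf; rw [pvSkipF]; omega
  | succ f ih =>
      intro i hf
      by_cases hc : i < arr.length ∧ arr.getD i false = false
      · rw [pvSkipF, if_pos hc]; exact ih (i + 1) (by omega)
      · rw [pvSkipF, if_neg hc]; exact hc

-- the middle loops run zero times when their condition fails …
theorem pvTrueLoop_no (arr : List Bool) (f i : Nat) (acc : List (Int × Int))
    (h : ¬ (i < arr.length ∧ arr.getD i false = true)) :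
    pvTrueLoop arr f i acc = (i, acc) := by
  cases f with
  | zero => rw [pvTrueLoop]
  | succ f => rw [pvTrueLoop, if_neg h]

theorem pvFalseLoop_no (arr : List Bool) (f i : Nat) (acc : List (Int × Int))
    (h : ¬ (i < arr.length ∧ arr.getD i false = false)) :
    pvFalseLoop arr f i acc = (i, acc) := by
  cases f with
  | zero => rw [pvFalseLoop]
  | succ f => rw [pvFalseLoop, if_neg h]

-- … and exactly once when it holds (the inner skip exhausts the whole run)
theorem pvTrueLoop_yes (arr : List Bool) (f i : Nat) (acc : List (Int × Int))
    (h : i < arr.length ∧ arr.getD i false = true) :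
    pvTrueLoop arr (f + 1) i acc =
      (pvSkipT arr arr.length i,
       acc ++ [((i : Int), (pvSkipT arr arr.length i : Int) - 1)]) := by
  rw [pvTrueLoop, if_pos h]
  exact pvTrueLoop_no arr f _ _ (pvSkipT_stop arr arr.length i (by omega))

theorem pvFalseLoop_yes (arr : List Bool) (f i : Nat) (acc : List (Int × Int))
    (h : i < arr.length ∧ arr.getD i false = false) :
    pvFalseLoop arr (f + 1) i acc =
      (pvSkipF arr arr.length i,
       acc ++ [((i : Int), (pvSkipF arr arr.length i : Int) - 1)]) := by
  rw [pvFalseLoop, if_pos h]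
  exact pvFalseLoop_no arr f _ _ (pvSkipF_stop arr arr.length i (by omega))

theorem pvTrueLoop_yes' (arr : List Bool) (f i : Nat) (acc : List (Int × Int))
    (h : i < arr.length ∧ arr.getD i false = true) (hf : 1 ≤ f) :
    pvTrueLoop arr f i acc =
      (pvSkipT arr arr.length i,
       acc ++ [((i : Int), (pvSkipT arr arr.length i : Int) - 1)]) := by
  cases f with
  | zero => omega
  | succ f => exact pvTrueLoop_yes arr f i acc h

theorem pvFalseLoop_yes' (arr : List Bool) (f i : Nat) (acc : List (Int × Int))
    (h : i < arr.length ∧ arr.getD i false = false) (hf : 1 ≤ f) :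
    pvFalseLoop arr f i acc =
      (pvSkipF arr arr.length i,
       acc ++ [((i : Int), (pvSkipF arr arr.length i : Int) - 1)]) := by
  cases f with
  | zero => omega
  | succ f => exact pvFalseLoop_yes arr f i acc h

-- pvRunsF is fuel-irrelevant once the fuel covers the list length
theorem pvRunsF_congr :
    ∀ (f f' : Nat) (l : List Bool), l.length ≤ f → l.length ≤ f' →
      pvRunsF f l = pvRunsF f' l := by
  intro f
  induction f with
  | zero =>
      intro f' l hf hf'
      have : l = [] := List.length_eq_zero_iff.mp (by omega)
      subst this
      cases f' <;> rfl
  | succ f ih =>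
      intro f' l hf hf'
      cases l with
      | nil => cases f' <;> rfl
      | cons x xs =>
          cases f' with
          | zero => simp at hf'
          | succ f' =>
              rw [pvRunsF, pvRunsF]
              congr 1
              have h1 := List.length_dropWhile_le (· == x) xs
              exact ih f' _ (by simp at hf ⊢; omega) (by simp at hf' ⊢; omega)

-- run decomposition of the suffix, true case
theorem pvRuns_drop_true (arr : List Bool) (i : Nat)
    (hl : i < arr.length) (hb : arr.getD i false = true) :
    pvRuns (arr.drop i) =
      (true, pvSkipT arr arr.length i - i) ::
        pvRuns (arr.drop (pvSkipT arr arr.length i)) := by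
  have hget : arr[i] = true := by rw [← pvGetD_lt hl]; exact hb
  have hd : arr.drop i = true :: arr.drop (i + 1) := by
    rw [List.drop_eq_getElem_cons hl, hget]
  have hskip := pvSkipT_eq arr arr.length i (by omega)
  rw [hd] at hskip
  simp only [List.takeWhile_cons, beq_self_eq_true, if_true, List.length_cons] at hskip
  unfold pvRuns
  rw [hd]
  rw [pvRunsF.eq_def]
  simp only [List.length_cons]
  congr 1
  · congr 1
    omega
  · rw [pvDropWhile_eq_drop, List.drop_drop]
    have hlen1 : i + 1 + ((arr.drop (i + 1)).takeWhile (· == true)).length =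
        pvSkipT arr arr.length i := by omega
    rw [hlen1]
    apply pvRunsF_congr
    · simp; omega
    · simp

theorem pvRuns_drop_false (arr : List Bool) (i : Nat)
    (hl : i < arr.length) (hb : arr.getD i false = false) :
    pvRuns (arr.drop i) =
      (false, pvSkipF arr arr.length i - i) ::
        pvRuns (arr.drop (pvSkipF arr arr.length i)) := by
  have hget : arr[i] = false := by rw [← pvGetD_lt hl]; exact hb
  have hd : arr.drop i = false :: arr.drop (i + 1) := by
    rw [List.drop_eq_getElem_cons hl, hget]
  have hskip := pvSkipF_eq arr arr.length i (by omega)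
  rw [hd] at hskip
  simp only [List.takeWhile_cons, beq_self_eq_true, if_true, List.length_cons] at hskip
  unfold pvRuns
  rw [hd]
  rw [pvRunsF.eq_def]
  simp only [List.length_cons]
  congr 1
  · congr 1
    omega
  · rw [pvDropWhile_eq_drop, List.drop_drop]
    have hlen1 : i + 1 + ((arr.drop (i + 1)).takeWhile (· == false)).length =
        pvSkipF arr arr.length i := by omega
    rw [hlen1]
    apply pvRunsF_congr
    · simp; omega
    · simp

-- main invariant for A: the outer loop from position i produces exactly the runs of the suffix
theorem pvMain (arr : List Bool) :
    ∀ (f i : Nat) (ta fa : List (Int × Int)), arr.length - i < f →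
      pvOuter arr f i ta fa =
        (ta ++ (pvEmit (pvRuns (arr.drop i)) i).1,
         fa ++ (pvEmit (pvRuns (arr.drop i)) i).2) := by
  intro f
  induction f with
  | zero => intro i ta fa hf; omega
  | succ f ih =>
      intro i ta fa hf
      by_cases hl : i < arr.length
      · rw [pvOuter, if_pos hl]
        rcases Bool.eq_false_or_eq_true (arr.getD i false) with hb | hb
        · -- true run first
          set j := pvSkipT arr arr.length i with hj
          have hji : i < j := by
            rw [hj, pvSkipT_eq arr arr.length i (by omega)]
            have : arr.drop i = arr[i] :: arr.drop (i + 1) := List.drop_eq_getElem_cons hl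
            rw [this]
            have hget : arr[i] = true := by rw [← pvGetD_lt hl]; exact hb
            simp [List.takeWhile_cons, hget]
          have hcast : (i : Int) + ((j - i : Nat) : Int) = (j : Int) := by
            push_cast [Nat.cast_sub (le_of_lt hji)]; ring
          simp only [pvTrueLoop_yes' arr arr.length i ta ⟨hl, hb⟩ (by omega), ← hj]
          have hstop := pvSkipT_stop arr arr.length i (by omega)
          rw [← hj] at hstop
          by_cases hjl : j < arr.length
          · -- a false run follows at j
            have hjb : arr.getD j false = false := by
              rcases Bool.eq_false_or_eq_true (arr.getD j false) with hb' | hb'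
              · exact absurd ⟨hjl, hb'⟩ hstop
              · exact hb'
            set j2 := pvSkipF arr arr.length j with hj2
            have hj2i : j < j2 := by
              rw [hj2, pvSkipF_eq arr arr.length j (by omega)]
              have : arr.drop j = arr[j] :: arr.drop (j + 1) :=
                List.drop_eq_getElem_cons hjl
              rw [this]
              have hget : arr[j] = false := by rw [← pvGetD_lt hjl]; exact hjb
              simp [List.takeWhile_cons, hget]
            have hcast2 : (j : Int) + ((j2 - j : Nat) : Int) = (j2 : Int) := by
              push_cast [Nat.cast_sub (le_of_lt hj2i)]; ring
            simp only [pvFalseLoop_yes' arr arr.length j fa ⟨hjl, hjb⟩ (by omega), ← hj2]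
            rw [ih j2 _ _ (by omega),
              pvRuns_drop_true arr i hl hb, ← hj,
              pvRuns_drop_false arr j hjl hjb, ← hj2, pvEmit, pvEmit]
            simp [hcast, hcast2]
          · -- the array ends at j
            simp only [pvFalseLoop_no arr arr.length j fa (fun hx => hjl hx.1)]
            rw [ih j _ _ (by omega), pvRuns_drop_true arr i hl hb, ← hj, pvEmit]
            simp [hcast]
        · -- false run first
          simp only [pvTrueLoop_no arr arr.length i ta (pvNotT hb)]
          set j := pvSkipF arr arr.length i with hj
          have hji : i < j := by
            rw [hj, pvSkipF_eq arr arr.length i (by omega)]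
            have : arr.drop i = arr[i] :: arr.drop (i + 1) := List.drop_eq_getElem_cons hl
            rw [this]
            have hget : arr[i] = false := by rw [← pvGetD_lt hl]; exact hb
            simp [List.takeWhile_cons, hget]
          have hcast : (i : Int) + ((j - i : Nat) : Int) = (j : Int) := by
            push_cast [Nat.cast_sub (le_of_lt hji)]; ring
          simp only [pvFalseLoop_yes' arr arr.length i fa ⟨hl, hb⟩ (by omega), ← hj]
          rw [ih j _ _ (by omega), pvRuns_drop_false arr i hl hb, ← hj, pvEmit]
          simp [hcast]
      · rw [pvOuter, if_neg hl, List.drop_of_length_le (by omega)]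
        simp [pvRuns, pvRunsF, pvEmit]

-- ====== B-side lemmas ======

theorem pvGetD_drop (l : List Bool) (n j : Nat) :
    (l.drop n).getD j false = l.getD (n + j) false := by
  simp [List.getD_eq_getElem?_getD, List.getElem?_drop]

theorem pvGetD_cons_succ (x : Bool) (xs : List Bool) (i : Nat) :
    (x :: xs).getD (i + 1) false = xs.getD i false := rfl

theorem pvTakeWhile_getD (xs : List Bool) (x : Bool) (i : Nat)
    (h : i < (xs.takeWhile (· == x)).length) : xs.getD i false = x := by
  have hle : (xs.takeWhile (· == x)).length ≤ xs.length :=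
    List.IsPrefix.length_le (List.takeWhile_prefix _)
  have hlt : i < xs.length := lt_of_lt_of_le h hle
  have hmem : ((xs.takeWhile (· == x))[i] == x) = true :=
    List.mem_takeWhile_imp (p := (· == x)) (List.getElem_mem h)
  have hpref : (xs.takeWhile (· == x))[i] = xs[i]'hlt :=
    List.IsPrefix.getElem (List.takeWhile_prefix _) h
  rw [pvGetD_lt hlt, ← hpref]
  exact eq_of_beq hmem

theorem pvDropWhile_head (xs : List Bool) (x y : Bool) (ys : List Bool)
    (h : xs.dropWhile (· == x) = y :: ys) : (y == x) = false := by
  have hne : xs.dropWhile (· == x) ≠ [] := by simp [h]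
  have h2 : (xs.dropWhile (· == x)).head hne = y := by simp [h]
  have := List.head_dropWhile_not (· == x) (l := xs) hne
  rw [h2] at this
  simpa using this

theorem pvRuns_cons (x : Bool) (xs : List Bool) :
    pvRuns (x :: xs) =
      (x, 1 + (xs.takeWhile (· == x)).length) :: pvRuns (xs.dropWhile (· == x)) := by
  show pvRunsF (xs.length + 1) (x :: xs) = _
  rw [pvRunsF]
  congr 1
  exact pvRunsF_congr _ _ _ (List.length_dropWhile_le _ _) le_rfl

-- the boundary list of x::xs = 0 followed by the boundary list of the remainder
-- after the first run, shifted by the first run's length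
theorem pvBounds_cons (x : Bool) (xs : List Bool) :
    pvBounds (x :: xs) =
      0 :: (pvBounds (xs.dropWhile (· == x))).map
        (· + (1 + (xs.takeWhile (· == x)).length)) := by
  have ht : (xs.takeWhile (· == x)).length ≤ xs.length :=
    List.IsPrefix.length_le (List.takeWhile_prefix _)
  set t := (xs.takeWhile (· == x)).length with htdef
  set rest := xs.dropWhile (· == x) with hrest
  have hm : rest.length = xs.length - t := by
    rw [hrest, pvDropWhile_eq_drop, List.length_drop, htdef]
  set m := rest.length with hmdef
  have hrange : (x :: xs).length + 1 = (1 + t) + (m + 1) := by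
    simp only [List.length_cons]; omega
  unfold pvBounds
  rw [hrange, List.range_add, List.filter_append, List.filter_map]
  have hrestdrop : rest = xs.drop t := by rw [hrest, pvDropWhile_eq_drop]
  -- run elements: (x::xs).getD i = x for i ≤ t
  have hrun : ∀ i, i ≤ t → (x :: xs).getD i false = x := by
    intro i hi
    cases i with
    | zero => rfl
    | succ i =>
        rw [pvGetD_cons_succ]
        exact pvTakeWhile_getD xs x i (by omega)
  -- suffix elements: (x::xs).getD (1 + t + j) = rest.getD j
  have hsuf : ∀ j, (x :: xs).getD (1 + t + j) false = rest.getD j false := by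
    intro j
    have : 1 + t + j = (t + j) + 1 := by omega
    rw [this, pvGetD_cons_succ, hrestdrop, pvGetD_drop]
  have hleft : (List.range (1 + t)).filter
      (fun i => i == 0 || i == (x :: xs).length ||
        ((x :: xs).getD i false != (x :: xs).getD (i - 1) false)) = [0] := by
    have hcongr : ∀ i ∈ List.range (1 + t),
        (i == 0 || i == (x :: xs).length ||
          ((x :: xs).getD i false != (x :: xs).getD (i - 1) false)) = (i == 0) := by
      intro i hi
      rw [List.mem_range] at hi
      cases Nat.eq_zero_or_pos i with
      | inl h0 => subst h0; rfl
      | inr hpos =>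
          have h1 : (i == 0) = false := by simp; omega
          have h2 : (i == (x :: xs).length) = false := by simp; omega
          have h3 : (x :: xs).getD i false = x := hrun i (by omega)
          have h4 : (x :: xs).getD (i - 1) false = x := hrun (i - 1) (by omega)
          rw [h1, h2, h3, h4]
          simp
    rw [List.filter_congr hcongr]
    -- filter (· == 0) over range (1 + t) is [0]
    have : 1 + t = t + 1 := by omega
    rw [this, List.range_succ_eq_map]
    simp
  rw [hleft]
  -- right part: shift-congruent to the boundary condition of rest
  have hcongr : ∀ j ∈ List.range (m + 1),
      ((fun i => i == 0 || i == (x :: xs).length ||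
        ((x :: xs).getD i false != (x :: xs).getD (i - 1) false)) ∘ (fun j => 1 + t + j)) j =
      (j == 0 || j == m ||
        (rest.getD j false != rest.getD (j - 1) false)) := by
    intro j hj
    rw [List.mem_range] at hj
    simp only [Function.comp]
    have hlen : (x :: xs).length = 1 + t + m := by
      simp only [List.length_cons]; omega
    cases Nat.eq_zero_or_pos j with
    | inl h0 =>
        subst h0
        simp only [Nat.add_zero]
        have hz : ((1 + t : Nat) == 0) = false := by simp
        rw [hz]
        cases hr : rest with
        | nil =>
            have hm0 : m = 0 := by rw [hmdef, hr]; rfl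
            have : ((1 + t : Nat) == (x :: xs).length) = true := by
              rw [hlen]; simp; omega
            rw [this]
            simp
        | cons y ys =>
            have hy : (y == x) = false := pvDropWhile_head xs x y ys (hrest ▸ hr)
            have hgl : (x :: xs).getD (1 + t) false = y := by
              have := hsuf 0
              rw [Nat.add_zero] at this
              rw [this, hr]; rfl
            have hgr : (x :: xs).getD (1 + t - 1) false = x := by
              have : 1 + t - 1 = t := by omega
              rw [this]; exact hrun t le_rfl
            rw [hgl, hgr]
            have : (y != x) = true := by simp_all
            rw [this]
            simp
    | inr hpos =>
        have h1 : ((1 + t + j : Nat) == 0) = false := by simp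
        have h2 : ((1 + t + j : Nat) == (x :: xs).length) = (j == m) := by
          rw [hlen]; by_cases h : j = m
          · subst h; simp
          · simp [h]
        have h3 : (x :: xs).getD (1 + t + j) false = rest.getD j false := hsuf j
        have h4 : (x :: xs).getD (1 + t + j - 1) false = rest.getD (j - 1) false := by
          have : 1 + t + j - 1 = 1 + t + (j - 1) := by omega
          rw [this]; exact hsuf (j - 1)
        have h5 : (j == 0) = false := by simp; omega
        rw [h1, h2, h3, h4, h5]
  rw [List.filter_congr hcongr]
  have hpb : pvBounds rest =
      (List.range (m + 1)).filter
        (fun j => j == 0 || j == m ||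
          (rest.getD j false != rest.getD (j - 1) false)) := by
    unfold pvBounds
    rw [← hmdef]
  rw [← hpb, List.singleton_append]
  have hfun : (fun j => 1 + t + j) = (fun j => j + (1 + t)) := by
    funext a; omega
  rw [hfun]

-- pvIv at a shifted offset = the shift of pvIv
theorem pvIv_shift (runs : List (Bool × Nat)) :
    ∀ (c o : Nat), pvIv runs (c + o) = (pvIv runs o).map (Prod.map (· + c) (· + c)) := by
  induction runs with
  | nil => intro c o; rfl
  | cons r rest ih =>
      intro c o
      obtain ⟨k, cc⟩ := r
      rw [pvIv, pvIv, List.map_cons]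
      congr 1
      · simp only [Prod.map]
        rw [Prod.mk.injEq]
        exact ⟨by omega, by omega⟩
      · have h : c + o + cc = c + (o + cc) := by omega
        rw [h, ih]

-- zipping the boundary list with its tail yields exactly the run intervals
theorem pvZipBounds :
    ∀ (f : Nat) (arr : List Bool), arr.length ≤ f →
      (pvBounds arr).zip (pvBounds arr).tail = pvIv (pvRuns arr) 0 := by
  intro f
  induction f with
  | zero =>
      intro arr hf
      have : arr = [] := List.length_eq_zero_iff.mp (by omega)
      subst this; rfl
  | succ f ih =>
      intro arr hf
      cases arr with
      | nil => rfl
      | cons x xs =>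
          have hrl : (xs.dropWhile (· == x)).length ≤ xs.length :=
            List.length_dropWhile_le _ _
          -- pvBounds of the remainder starts with 0
          obtain ⟨b'', hb'⟩ : ∃ b'', pvBounds (xs.dropWhile (· == x)) = 0 :: b'' := by
            cases hr : xs.dropWhile (· == x) with
            | nil => exact ⟨[], rfl⟩
            | cons y ys => exact ⟨_, pvBounds_cons y ys⟩
          rw [pvBounds_cons, pvRuns_cons, hb', List.map_cons]
          simp only [List.tail_cons]
          rw [List.zip_cons_cons]
          have hmap : ((0 : Nat) + (1 + (xs.takeWhile (· == x)).length)) ::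
              b''.map (· + (1 + (xs.takeWhile (· == x)).length)) =
              (pvBounds (xs.dropWhile (· == x))).map
                (· + (1 + (xs.takeWhile (· == x)).length)) := by
            rw [hb', List.map_cons]
          have htail : b''.map (· + (1 + (xs.takeWhile (· == x)).length)) =
              ((pvBounds (xs.dropWhile (· == x))).tail).map
                (· + (1 + (xs.takeWhile (· == x)).length)) := by
            rw [hb', List.tail_cons]
          rw [hmap, htail, List.zip_map, ih (xs.dropWhile (· == x)) (by simp at hf; omega)]
          rw [pvIv]
          congr 1
          have hs := pvIv_shift (pvRuns (xs.dropWhile (· == x)))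
            (1 + (xs.takeWhile (· == x)).length) 0
          rw [Nat.add_zero] at hs
          rw [Nat.zero_add]
          exact hs.symm

-- filtering the run intervals by the element at the start index = pvEmit
theorem pvFilt :
    ∀ (f : Nat) (arr : List Bool) (off : Nat), arr.length - off ≤ f →
      ((pvIv (pvRuns (arr.drop off)) off).filter
          (fun p => arr.getD p.1 false)).map (fun p => ((p.1 : Int), (p.2 : Int) - 1)) =
        (pvEmit (pvRuns (arr.drop off)) (off : Int)).1 ∧
      ((pvIv (pvRuns (arr.drop off)) off).filter
          (fun p => !arr.getD p.1 false)).map (fun p => ((p.1 : Int), (p.2 : Int) - 1)) =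
        (pvEmit (pvRuns (arr.drop off)) (off : Int)).2 := by
  intro f
  induction f with
  | zero =>
      intro arr off hf
      rw [List.drop_of_length_le (by omega)]
      exact ⟨rfl, rfl⟩
  | succ f ih =>
      intro arr off hf
      cases hd : arr.drop off with
      | nil => exact ⟨rfl, rfl⟩
      | cons y ys =>
          have hlen : (arr.drop off).length = arr.length - off := List.length_drop ..
          rw [hd] at hlen
          have ht : (ys.takeWhile (· == y)).length ≤ ys.length :=
            List.IsPrefix.length_le (List.takeWhile_prefix _)
          have hy : arr.getD off false = y := by
            have h0 := pvGetD_drop arr off 0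
            rw [Nat.add_zero, hd] at h0
            exact h0.symm
          have hrest : ys.dropWhile (· == y) =
              arr.drop (off + (1 + (ys.takeWhile (· == y)).length)) := by
            rw [pvDropWhile_eq_drop]
            have h1 : arr.drop (off + (1 + (ys.takeWhile (· == y)).length)) =
                (arr.drop off).drop (1 + (ys.takeWhile (· == y)).length) := by
              rw [List.drop_drop]
            rw [h1, hd]
            have h2 : 1 + (ys.takeWhile (· == y)).length =
                (ys.takeWhile (· == y)).length + 1 := by omega
            rw [h2]
            rfl
          have hih := ih arr (off + (1 + (ys.takeWhile (· == y)).length))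
            (by simp only [List.length_cons] at hlen; omega)
          rw [pvRuns_cons, pvIv, pvEmit]
          have hc1 : ((off + (1 + (ys.takeWhile (· == y)).length) : Nat) : Int) =
              (off : Int) + ((1 + (ys.takeWhile (· == y)).length : Nat) : Int) := by
            push_cast; ring
          rw [← hrest] at hih
          rw [hc1] at hih
          cases y with
          | true =>
              rw [if_pos rfl]
              constructor
              · rw [List.filter_cons]
                simp only [hy]
                rw [if_pos trivial, List.map_cons, hih.1]
                congr 1
              · rw [List.filter_cons]
                simp only [hy, Bool.not_true]
                rw [if_neg (by simp)]
                exact hih.2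
          | false =>
              rw [if_neg (by simp)]
              constructor
              · rw [List.filter_cons]
                simp only [hy]
                rw [if_neg (by simp)]
                exact hih.1
              · rw [List.filter_cons]
                simp only [hy, Bool.not_false]
                rw [if_pos trivial, List.map_cons, hih.2]
                congr 1

-- ===== VERDICT (by name: the statement is the Claim_ definition above) =====
theorem find_most_consecutive_areas_spec : Claim_equal_find_most_consecutive_areas := by
  intro arr _
  unfold Spec_find_most_consecutive_areas find_most_consecutive_areas
    find_most_consecutive_areas_alt
  have hA := pvMain arr (arr.length + 1) 0 [] [] (by omega)
  have hZ := pvZipBounds arr.length arr le_rfl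
  have hF := pvFilt arr.length arr 0 (by omega)
  rw [List.drop_zero] at hF
  simp only [hA, List.drop_zero, List.nil_append]
  rw [hZ, hF.1, hF.2]
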